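-- pv_equiv track=rewrite | github.com/RamananVr/Leetcodepython | strings/2645_minimum_additions_to_make_valid_string.py | addMinimumCounting
-- ===== SOURCE A (Python) =====
-- def addMinimumCounting(word: str) -> int:
--     """
--     Approach using counting of complete groups.
--
--     Args:
--     word: String containing only 'a', 'b', 'c'
--
--     Returns:
--     Minimum number of characters to add
--     """
--     # Count how many complete "abc" groups we need
--     groups = 0
--     i = 0
--     n = len(word)
--
--     while i < n:
--         if word[i] == 'a':
--             groups += 1
--             i += 1
--             # Skip 'b' if present
--             if i < n and word[i] == 'b':
--                 i += 1
--                 # Skip 'c' if present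
--                 if i < n and word[i] == 'c':
--                     i += 1
--         elif word[i] == 'b':
--             groups += 1
--             i += 1
--             # Skip 'c' if present
--             if i < n and word[i] == 'c':
--                 i += 1
--         else:  # word[i] == 'c'
--             groups += 1
--             i += 1
--
--     # Total characters needed = groups * 3
--     # Characters we have = len(word)
--     return groups * 3 - len(word)
-- ===== SOURCE B (Python) =====
-- def addMinimumCounting(word: str) -> int:
--     if not word:
--         return 0
--     boundaries = sum(1 for p, q in zip(word, word[1:])
--                      if (p, q) != ('a', 'b') and (p, q) != ('b', 'c'))
--     return (1 + boundaries) * 3 - len(word)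
-- ===== Notes on version B (the rewrite author's own statement) =====
-- stated objective: simpler
-- what changed: Replaces A's stride-skipping while loop with nested branch ifs by a single flat pass over adjacent character pairs counting group boundaries ((p,q) not in {(a,b),(b,c)}), then groups*3 - len.
import Mathlib
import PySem

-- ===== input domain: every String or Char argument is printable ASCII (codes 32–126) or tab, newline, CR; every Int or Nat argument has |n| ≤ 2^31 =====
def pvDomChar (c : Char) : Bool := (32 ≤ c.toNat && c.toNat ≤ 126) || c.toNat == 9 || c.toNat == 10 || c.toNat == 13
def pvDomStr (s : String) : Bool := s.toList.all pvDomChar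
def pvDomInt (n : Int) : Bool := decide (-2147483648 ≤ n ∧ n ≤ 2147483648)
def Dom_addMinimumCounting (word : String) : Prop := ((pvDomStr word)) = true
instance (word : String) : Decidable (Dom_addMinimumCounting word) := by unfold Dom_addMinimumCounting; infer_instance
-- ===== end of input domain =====

-- B replaces A's stride-skipping group consumer by a flat adjacent-pair boundary count (simpler decomposition, same O(n) cost).

-- ===== PORT A =====
-- A's while loop advances i by 1-3 via nested skip-ifs; ported as recursion on the remaining
-- suffix with one pattern per branch path (same branch order, same skips).
def pvLoopA : List Char → Int
  | [] => 0
  | 'a' :: 'b' :: 'c' :: r => 1 + pvLoopA r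
  | 'a' :: 'b' :: r => 1 + pvLoopA r
  | 'a' :: r => 1 + pvLoopA r
  | 'b' :: 'c' :: r => 1 + pvLoopA r
  | 'b' :: r => 1 + pvLoopA r
  | _ :: r => 1 + pvLoopA r

def addMinimumCounting (word : String) : Int :=
  pvLoopA word.toList * 3 - (word.toList.length : Int)

-- ===== PORT B =====
-- sum over zip(word, word[1:]) of boundary indicators
def pvBoundCount : List Char → Int
  | [] => 0
  | [_] => 0
  | p :: q :: rest =>
    (if ¬((p = 'a' ∧ q = 'b')) ∧ ¬((p = 'b' ∧ q = 'c')) then 1 else 0) + pvBoundCount (q :: rest)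

def addMinimumCounting_alt (word : String) : Int :=
  match word.toList with
  | [] => 0
  | l => (1 + pvBoundCount l) * 3 - (l.length : Int)

-- ===== PRECONDITION & SPEC =====
def Spec_addMinimumCounting (word : String) (out : Int) : Prop := out = addMinimumCounting_alt word
instance (word : String) (out : Int) : Decidable (Spec_addMinimumCounting word out) := by unfold Spec_addMinimumCounting; infer_instance

-- ===== CLAIM (what is proved, stated in full; the proofs are below) =====
def Claim_equal_addMinimumCounting : Prop := ∀ (word : String), Dom_addMinimumCounting word → Spec_addMinimumCounting word (addMinimumCounting word)

-- ===== LEMMAS AND PROOFS =====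

-- groups as B sees them: 0 for empty, else 1 + boundary count
def pvG : List Char → Int
  | [] => 0
  | l => 1 + pvBoundCount l

-- key invariant: A's skipping loop counts exactly B's groups
theorem pvLoopA_eq_pvG : ∀ (l : List Char), pvLoopA l = pvG l := by
  intro l
  induction l using pvLoopA.induct with
  | case1 => simp [pvLoopA, pvG]
  | case2 r ih =>
    simp only [pvLoopA, ih]
    cases r with
    | nil => simp [pvBoundCount, pvG]
    | cons x t => simp [pvBoundCount, pvG]
  | case3 r h ih =>
    simp only [pvLoopA, ih]
    cases r with
    | nil => simp [pvBoundCount, pvG]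
    | cons x t =>
      have hx : x ≠ 'c' := fun he => h t (by rw [he])
      simp [pvBoundCount, pvG, hx]
  | case4 r h1 h2 ih =>
    simp only [pvLoopA, ih]
    cases r with
    | nil => simp [pvBoundCount, pvG]
    | cons x t =>
      have hx : x ≠ 'b' := fun he => h2 t (by rw [he])
      simp [pvBoundCount, pvG, hx]
  | case5 r ih =>
    simp only [pvLoopA, ih]
    cases r with
    | nil => simp [pvBoundCount, pvG]
    | cons x t => simp [pvBoundCount, pvG]
  | case6 r h ih =>
    simp only [pvLoopA, ih]
    cases r with
    | nil => simp [pvBoundCount, pvG]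
    | cons x t =>
      have hx : x ≠ 'c' := fun he => h t (by rw [he])
      simp [pvBoundCount, pvG, hx]
  | case7 c r h1 h2 ha h3 hb ih =>
    simp only [pvLoopA, ih]
    have hca : c ≠ 'a' := fun he => ha he
    have hcb : c ≠ 'b' := fun he => hb he
    cases r with
    | nil => simp [pvBoundCount, pvG]
    | cons x t => simp [pvBoundCount, pvG, hca, hcb]

-- ===== VERDICT (by name: the statement is the Claim_ definition above) =====
theorem addMinimumCounting_spec : Claim_equal_addMinimumCounting := by
  intro word _
  unfold Spec_addMinimumCounting addMinimumCounting addMinimumCounting_alt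
  rw [pvLoopA_eq_pvG]
  cases h : word.toList with
  | nil => simp [pvG]
  | cons c r => simp [pvG]
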